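-- pv_equiv track=rewrite | github.com/velkoborsky/hashdiff | hashdiff/common.py | find_duplicate_in_sorted
-- ===== SOURCE A (Python) =====
-- from typing import Iterable, Any
--
-- def find_duplicate_in_sorted(xs: Iterable):
--     """
--     For a sorted iterable returns the first duplicate value found or None if there is not any
--     """
--     try:
--         prev, *tail = xs
--         for x in tail:
--             if x == prev:
--                 return x
--             else:
--                 prev = x
--         return None
--     except ValueError:
--         return None
-- ===== SOURCE B (Python) =====
-- def find_duplicate_in_sorted(xs):
--     """
--     For a sorted iterable returns the first duplicate value found or None if there is not any
--     """
--     lst = list(xs)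
--     n = len(lst)
--     i = 0
--     while i < n:
--         # extend the run of elements equal to lst[i]
--         j = i + 1
--         while j < n and lst[j] == lst[i]:
--             j += 1
--         if j - i > 1:
--             return lst[i + 1]
--         i = j
--     return None
-- ===== Notes on version B (the rewrite author's own statement) =====
-- stated objective: alternative
-- what changed: Replaces A's element-by-element prev-tracking scan (with try/except unpacking for the empty case) by a run/group decomposition: an outer loop over run starts with an inner loop extending each run of equal elements, returning the run's second element when a run has length > 1.
import Mathlib
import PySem

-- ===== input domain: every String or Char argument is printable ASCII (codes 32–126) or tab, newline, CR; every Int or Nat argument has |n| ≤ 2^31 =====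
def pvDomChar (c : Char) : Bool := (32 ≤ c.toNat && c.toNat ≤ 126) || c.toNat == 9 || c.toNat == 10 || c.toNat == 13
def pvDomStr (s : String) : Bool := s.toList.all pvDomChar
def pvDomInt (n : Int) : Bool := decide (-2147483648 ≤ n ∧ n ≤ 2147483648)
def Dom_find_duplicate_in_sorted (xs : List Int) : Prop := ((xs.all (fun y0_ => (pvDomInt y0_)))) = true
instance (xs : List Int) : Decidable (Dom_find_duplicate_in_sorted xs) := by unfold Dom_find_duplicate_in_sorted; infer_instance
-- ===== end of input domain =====

-- B finds the first duplicate by grouping: an outer loop over run starts and an inner loop extending each run of equal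
-- elements, returning the run's second element when a run has length > 1 (alternative decomposition; same cost).


-- ===== PORT A =====
-- A: unpack head as prev, loop over tail returning x when x == prev, else advance prev;
-- empty xs hits the ValueError branch → none.
def findDupGo (prev : Int) : List Int → Option Int
  | [] => none
  | x :: rest => if x = prev then some x else findDupGo x rest

def find_duplicate_in_sorted (xs : List Int) : Option Int :=
  match xs with
  | [] => none
  | prev :: tail => findDupGo prev tail

-- ===== PORT B =====
-- Inner while loop: 'while j < n and lst[j] == lst[i]: j += 1'; both indices are in range when
-- compared, so comparing the pyGet? options equals Python's comparison of the two values.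
def fdsInner (lst : List Int) (n : Int) (hd : Option Int) (j : Int) : Int :=
  if j < n ∧ PySem.List.pyGet? lst j = hd then fdsInner lst n hd (j + 1) else j
  termination_by (n - j).toNat
  decreasing_by omega

-- the inner while loop never moves j backwards (needed for the outer loop's termination)
theorem fdsInner_ge (lst : List Int) (n : Int) (hd : Option Int) (j : Int) :
    j ≤ fdsInner lst n hd j := by
  fun_induction fdsInner with
  | case1 j h ih => omega
  | case2 j h => omega

-- Outer while loop over run starts i; 'return lst[i + 1]' is the run's second element (in range there).
def fdsOuter (lst : List Int) (n : Int) (i : Int) : Option Int :=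
  if i < n then
    let j := fdsInner lst n (PySem.List.pyGet? lst i) (i + 1)
    if j - i > 1 then PySem.List.pyGet? lst (i + 1)
    else fdsOuter lst n j
  else none
  termination_by (n - i).toNat
  decreasing_by
    have := fdsInner_ge lst n (PySem.List.pyGet? lst i) (i + 1); omega

def find_duplicate_in_sorted_alt (xs : List Int) : Option Int :=
  fdsOuter xs xs.length 0

-- ===== PRECONDITION & SPEC =====
def Spec_find_duplicate_in_sorted (xs : List Int) (out : Option Int) : Prop := out = find_duplicate_in_sorted_alt xs
instance (xs : List Int) (out : Option Int) : Decidable (Spec_find_duplicate_in_sorted xs out) := by unfold Spec_find_duplicate_in_sorted; infer_instance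

-- ===== CLAIM (what is proved, stated in full; the proofs are below) =====
def Claim_equal_find_duplicate_in_sorted : Prop := ∀ (xs : List Int), Dom_find_duplicate_in_sorted xs → Spec_find_duplicate_in_sorted xs (find_duplicate_in_sorted xs)

-- ===== LEMMAS AND PROOFS =====

-- from position i, B's outer loop computes exactly A's prev-scan over the remaining suffix
lemma bridge (xs : List Int) :
    ∀ (k i : Nat), xs.length - i ≤ k → (h : i < xs.length) →
      fdsOuter xs xs.length i = findDupGo xs[i] (xs.drop (i + 1)) := by
  intro k
  induction k with
  | zero => intro i hk hi; omega
  | succ k ih =>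
    intro i hk hi
    have hi' : (i : Int) < (xs.length : Int) := by exact_mod_cast hi
    have hget : PySem.List.pyGet? xs (i : Int) = some xs[i] := by
      simp [PySem.List.pyGet?_natCast, List.getElem?_eq_getElem hi]
    rw [fdsOuter, if_pos hi']
    by_cases hdup : i + 1 < xs.length ∧ xs[i + 1]? = some xs[i]
    · -- duplicate right after i: the inner loop advances at least to i + 2
      obtain ⟨hlt, heq⟩ := hdup
      have hget1 : PySem.List.pyGet? xs ((i : Int) + 1) = some xs[i] := by
        have : ((i : Int) + 1) = ((i + 1 : Nat) : Int) := by push_cast; ring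
        rw [this, PySem.List.pyGet?_natCast, heq]
      have hstep : fdsInner xs xs.length (PySem.List.pyGet? xs i) ((i : Int) + 1)
          = fdsInner xs xs.length (PySem.List.pyGet? xs i) ((i : Int) + 1 + 1) := by
        rw [fdsInner]
        rw [if_pos ⟨by exact_mod_cast hlt, by rw [hget1, hget]⟩]
      have hge := fdsInner_ge xs xs.length (PySem.List.pyGet? xs i) ((i : Int) + 1 + 1)
      rw [hstep] at *
      rw [if_pos (by omega)]
      rw [List.drop_eq_getElem_cons hlt, findDupGo]
      have hval : xs[i + 1] = xs[i] := by
        have := List.getElem?_eq_getElem hlt; rw [this] at heq; exact Option.some.inj heq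
      rw [if_pos hval, hget1, hval]
    · -- no duplicate at i + 1: the inner loop stops immediately, the outer loop moves to i + 1
      have hstop : fdsInner xs xs.length (PySem.List.pyGet? xs i) ((i : Int) + 1) = (i : Int) + 1 := by
        rw [fdsInner, if_neg]
        intro ⟨h1, h2⟩
        have h1' : i + 1 < xs.length := by exact_mod_cast h1
        apply hdup
        refine ⟨h1', ?_⟩
        have : ((i : Int) + 1) = ((i + 1 : Nat) : Int) := by push_cast; ring
        rw [this, PySem.List.pyGet?_natCast, hget] at h2
        exact h2
      rw [hstop, if_neg (by omega)]
      by_cases hend : i + 1 < xs.length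
      · have hcast : ((i : Int) + 1) = ((i + 1 : Nat) : Int) := by push_cast; ring
        rw [hcast, ih (i + 1) (by omega) hend]
        rw [List.drop_eq_getElem_cons hend, findDupGo]
        have hne : ¬ xs[i + 1] = xs[i] := by
          intro h
          exact hdup ⟨hend, by rw [List.getElem?_eq_getElem hend, h]⟩
        rw [if_neg hne]
      · have hlen : i + 1 = xs.length := by omega
        rw [fdsOuter, if_neg (by omega)]
        rw [show i + 1 = xs.length from hlen, List.drop_length, findDupGo]

-- ===== VERDICT (by name: the statement is the Claim_ definition above) =====
theorem find_duplicate_in_sorted_spec : Claim_equal_find_duplicate_in_sorted := by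
  intro xs _
  show find_duplicate_in_sorted xs = find_duplicate_in_sorted_alt xs
  cases xs with
  | nil =>
    show (none : Option Int) = fdsOuter [] 0 0
    rw [fdsOuter]; simp
  | cons p t =>
    have h0 : 0 < (p :: t).length := by simp
    have := bridge (p :: t) (p :: t).length 0 (by omega) h0
    simp at this
    simpa [find_duplicate_in_sorted, find_duplicate_in_sorted_alt] using this.symm
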